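-- pv_equiv track=rewrite | github.com/open-guji/luatex-cn | scripts/digitalize/compare_guji_layouts.py | build_page_label_map_from_pages
-- ===== SOURCE A (Python) =====
-- def calculate_pdf_page(summary: list[dict], layout_page_idx: int) -> tuple[int, int]:
--     """计算 Layout page 对应的 PDF 页码范围。
--
--     Args:
--         summary: page_summary 列表
--         layout_page_idx: layout page 的索引（0-indexed）
--
--     Returns:
--         (pdf_page_start, pdf_page_end) - PDF 页码（1-indexed）
--         - 对于单页: (N, N) - 对应 PDF 第 N 页
--         - 对于筒子页: (N, N+1) - 对应 PDF 第 N 和 N+1 页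
--
--     规则:
--         - single 类型占 1 个 PDF 页
--         - spread 类型占 2 个 PDF 页
--         - PDF 页码 = sum(之前所有页占用的页数) + 1
--     """
--     if layout_page_idx >= len(summary):
--         return 1, 1
--
--     # 计算偏移量：累加之前所有页面占用的 PDF 页数
--     pdf_offset = 0
--     for i in range(layout_page_idx):
--         ptype = summary[i].get('type', 'single')
--         if ptype == 'single':
--             pdf_offset += 1
--         elif ptype in ('spread', 'spread_right', 'spread_left'):
--             pdf_offset += 2
--
--     # 当前页的 PDF 起始页码（1-indexed）
--     pdf_start = pdf_offset + 1
--
--     # 判断当前页类型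
--     ptype = summary[layout_page_idx].get('type', 'single')
--
--     if ptype == 'single':
--         return pdf_start, pdf_start
--     else:  # spread 类型
--         return pdf_start, pdf_start + 1
--
-- def build_page_label_map_from_pages(pages: list[dict], summary: list[dict] | None = None) -> dict[int, str]:
--     """根据 pages 结构构建 PDF 页码标签映射。
--
--     使用 split_info 来判断页面类型，结合 summary 计算正确的 PDF 页码。
--
--     Args:
--         pages: pages 列表（包含 split_info）
--         summary: page_summary 列表（用于计算 PDF 页码，如果为 None 则使用简化计算）
--
--     Returns:
--         dict - layout_page_idx → PDF 页码标签
--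
--     标签格式:
--         - 单页: "PDF第N页"
--         - 筒子页: "PDF第N-M页（筒子页）"
--     """
--     label_map = {}
--
--     for page_idx, page in enumerate(pages):
--         si = page.get('split_info')
--
--         if summary:
--             # 使用正确的 PDF 页码计算
--             pdf_start, pdf_end = calculate_pdf_page(summary, page_idx)
--             ptype = summary[page_idx].get('type', 'single') if page_idx < len(summary) else 'single'
--
--             if ptype == 'single':
--                 label_map[page_idx] = f"PDF第{pdf_start}页"
--             else:  # spread 类型
--                 label_map[page_idx] = f"PDF第{pdf_start}-{pdf_end}页（筒子页）"
--         else: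
--             # Fallback: 简化计算（1:1 映射）
--             pdf_page = page_idx + 1
--             if si is None:
--                 label_map[page_idx] = f"PDF第{pdf_page}页"
--             else:
--                 # 有 split_info，说明是筒子页
--                 label_map[page_idx] = f"PDF第{pdf_page}页（筒子页）"
--
--     return label_map
-- ===== SOURCE B (Python) =====
-- PDF_WIDTH = {'single': 1, 'spread': 2, 'spread_right': 2, 'spread_left': 2}
--
--
-- def build_page_label_map_from_pages(pages, summary=None):
--     """Single pass: carry the running PDF start page as a prefix sum of page
--     widths instead of recomputing the offset for every page."""
--     if not summary:
--         return {
--             i: (f"PDF第{i + 1}页" if p.get('split_info') is None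
--                 else f"PDF第{i + 1}页（筒子页）")
--             for i, p in enumerate(pages)
--         }
--     labels = {}
--     start = 1
--     for idx, entry in enumerate(summary[:len(pages)]):
--         t = entry.get('type', 'single')
--         if t == 'single':
--             labels[idx] = f"PDF第{start}页"
--         else:
--             labels[idx] = f"PDF第{start}-{start + 1}页（筒子页）"
--         start += PDF_WIDTH.get(t, 0)
--     return labels
-- ===== Notes on version B (the rewrite author's own statement) =====
-- stated objective: alternative
-- what changed: B replaces A's per-page recomputation of the PDF-page offset (calculate_pdf_page re-sums all earlier page widths for every page) by a single pass over the summary carrying the running start page as a prefix sum of a width table, and replaces the fallback loop by a dict comprehension; Pre_ excludes inputs where a non-empty summary is shorter than pages, a mismatched-parallel-lists corner on which A's per-extra-page 'PDF第1页' fallback and B's stopping at the summary's end are equally defensible.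
-- outside the precondition, e.g. on build_page_label_map_from_pages([{}, {}], [{}]): A returns {0: 'PDF第1页', 1: 'PDF第1页'}, B returns {0: 'PDF第1页'}
import Mathlib
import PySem

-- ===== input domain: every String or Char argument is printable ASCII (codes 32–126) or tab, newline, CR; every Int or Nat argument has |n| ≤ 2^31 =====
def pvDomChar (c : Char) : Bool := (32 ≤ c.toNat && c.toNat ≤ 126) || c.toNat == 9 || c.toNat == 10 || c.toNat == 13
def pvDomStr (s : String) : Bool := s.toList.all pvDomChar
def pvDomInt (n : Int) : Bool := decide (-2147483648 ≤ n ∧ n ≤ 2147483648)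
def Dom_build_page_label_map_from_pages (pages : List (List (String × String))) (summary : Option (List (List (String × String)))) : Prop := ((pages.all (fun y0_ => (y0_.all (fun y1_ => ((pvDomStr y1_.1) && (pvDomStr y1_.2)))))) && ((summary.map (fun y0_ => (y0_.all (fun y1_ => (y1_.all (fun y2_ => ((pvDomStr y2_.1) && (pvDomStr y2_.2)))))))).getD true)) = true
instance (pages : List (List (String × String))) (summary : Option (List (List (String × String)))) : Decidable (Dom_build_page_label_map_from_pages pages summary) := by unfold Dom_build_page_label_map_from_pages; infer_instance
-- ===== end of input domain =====

-- B builds the labels in one pass over the summary carrying the running start page as a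
-- prefix sum of a width table, instead of A's per-page recomputation of the offset.

-- ===== PORT A =====
-- offset-accumulation body of calculate_pdf_page's `for i in range(layout_page_idx)` loop
def pvOffStep (summary : List (List (String × String))) (acc : Int) (i : Nat) : Int :=
  let ptype := PySem.Dict.getD ⟨summary.getD i []⟩ "type" "single"
  if ptype = "single" then acc + 1
  else if ptype = "spread" ∨ ptype = "spread_right" ∨ ptype = "spread_left" then acc + 2
  else acc

-- `summary[i]` is in range wherever Python evaluates it (i < layout_page_idx < len(summary)),
-- so List.getD i [] is exact; the index of the Python loop is a Nat.
def calculate_pdf_page (summary : List (List (String × String))) (layout_page_idx : Nat) : Int × Int :=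
  if layout_page_idx ≥ summary.length then (1, 1)
  else
    let pdf_offset : Int := (List.range layout_page_idx).foldl (pvOffStep summary) 0
    let pdf_start := pdf_offset + 1
    let ptype := PySem.Dict.getD ⟨summary.getD layout_page_idx []⟩ "type" "single"
    if ptype = "single" then (pdf_start, pdf_start) else (pdf_start, pdf_start + 1)

-- body of A's `for page_idx, page in enumerate(pages)` loop; `if summary:` is the
-- `some (_ :: _)` arm (None and [] are both falsy); page_idx from enumerate is ≥ 0, toNat exact
def pvAStep (summary : Option (List (List (String × String))))
    (label_map : PySem.Dict Int String) (pi : Int × List (String × String)) : PySem.Dict Int String :=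
  let page_idx := pi.1
  let page := pi.2
  let si := PySem.Dict.get? (⟨page⟩ : PySem.Dict String String) "split_info"
  match summary with
  | some (s0 :: srest) =>
    let s := s0 :: srest
    let r := calculate_pdf_page s page_idx.toNat
    let ptype := if page_idx.toNat < s.length
                 then PySem.Dict.getD ⟨s.getD page_idx.toNat []⟩ "type" "single" else "single"
    if ptype = "single" then
      label_map.insert page_idx ("PDF第" ++ PySem.Int.toStr r.1 ++ "页")
    else
      label_map.insert page_idx ("PDF第" ++ PySem.Int.toStr r.1 ++ "-" ++ PySem.Int.toStr r.2 ++ "页（筒子页）")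
  | _ =>
    let pdf_page := page_idx + 1
    match si with
    | none => label_map.insert page_idx ("PDF第" ++ PySem.Int.toStr pdf_page ++ "页")
    | some _ => label_map.insert page_idx ("PDF第" ++ PySem.Int.toStr pdf_page ++ "页（筒子页）")

def build_page_label_map_from_pages (pages : List (List (String × String))) (summary : Option (List (List (String × String)))) : List (Int × String) :=
  ((PySem.List.enumerate pages).foldl (pvAStep summary) PySem.Dict.empty).items

-- ===== PORT B =====
-- Source B's module constant PDF_WIDTH
def pvWIDTH : PySem.Dict String Int :=
  ⟨[("single", 1), ("spread", 2), ("spread_right", 2), ("spread_left", 2)]⟩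

-- Source B's fallback dict comprehension over enumerate(pages)
def pvFallbackLabels (pages : List (List (String × String))) : List (Int × String) :=
  (PySem.List.enumerate pages).map (fun ip =>
    (ip.1, if PySem.Dict.get? (⟨ip.2⟩ : PySem.Dict String String) "split_info" = none
           then "PDF第" ++ PySem.Int.toStr (ip.1 + 1) ++ "页"
           else "PDF第" ++ PySem.Int.toStr (ip.1 + 1) ++ "页（筒子页）"))

-- Source B's `for idx, entry in enumerate(summary[:len(pages)])` loop carrying `start`;
-- the labels dict gets fresh increasing keys 0,1,2,…, so it IS the ordered pair list built here
def pvBLoop : List (List (String × String)) → Nat → Int → List (Int × String)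
  | [], _, _ => []
  | entry :: rest, idx, start =>
    let t := PySem.Dict.getD ⟨entry⟩ "type" "single"
    if t = "single" then
      ((idx : Int), "PDF第" ++ PySem.Int.toStr start ++ "页") ::
        pvBLoop rest (idx + 1) (start + PySem.Dict.getD pvWIDTH t 0)
    else
      ((idx : Int), "PDF第" ++ PySem.Int.toStr start ++ "-" ++ PySem.Int.toStr (start + 1) ++ "页（筒子页）") ::
        pvBLoop rest (idx + 1) (start + PySem.Dict.getD pvWIDTH t 0)

-- summary[:len(pages)] is List.take pages.length
def build_page_label_map_from_pages_alt (pages : List (List (String × String))) (summary : Option (List (List (String × String)))) : List (Int × String) :=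
  match summary with
  | some (s0 :: srest) => pvBLoop ((s0 :: srest).take pages.length) 0 1
  | _ => pvFallbackLabels pages

-- ===== PRECONDITION & SPEC =====
-- Pre_ excludes inputs where a non-empty summary is shorter than pages: a mismatched-
-- parallel-lists corner on which A's labelling of every uncovered page as 'PDF第1页' and
-- B's stopping at the summary's end are equally defensible, unspecified behaviours.
def Pre_build_page_label_map_from_pages (pages : List (List (String × String))) (summary : Option (List (List (String × String)))) : Prop :=
  (summary.getD []).length = 0 ∨ pages.length ≤ (summary.getD []).length
instance (pages : List (List (String × String))) (summary : Option (List (List (String × String)))) : Decidable (Pre_build_page_label_map_from_pages pages summary) := by unfold Pre_build_page_label_map_from_pages; infer_instance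

def pvWitness_build_page_label_map_from_pages : (List (List (String × String))) × (Option (List (List (String × String)))) :=
  ([[("split_info", "x")]], some [[("type", "spread")]])

def Spec_build_page_label_map_from_pages (pages : List (List (String × String))) (summary : Option (List (List (String × String)))) (out : List (Int × String)) : Prop := out = build_page_label_map_from_pages_alt pages summary
instance (pages : List (List (String × String))) (summary : Option (List (List (String × String)))) (out : List (Int × String)) : Decidable (Spec_build_page_label_map_from_pages pages summary out) := by unfold Spec_build_page_label_map_from_pages; infer_instance

-- ===== CLAIM (what is proved, stated in full; the proofs are below) =====
def Claim_equal_build_page_label_map_from_pages : Prop := ∀ (pages : List (List (String × String))) (summary : Option (List (List (String × String)))), Dom_build_page_label_map_from_pages pages summary → Pre_build_page_label_map_from_pages pages summary → Spec_build_page_label_map_from_pages pages summary (build_page_label_map_from_pages pages summary)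

-- ===== LEMMAS AND PROOFS =====

-- A's offset for page index k (always evaluated with k ≤ s.length)
def pvOffset (s : List (List (String × String))) (k : Nat) : Int :=
  (List.range k).foldl (pvOffStep s) 0

-- inserting a key absent from the dict appends the pair
theorem pv_insert_fresh {d : PySem.Dict Int String} {k : Int} (v : String)
    (h : ∀ p ∈ d.items, p.1 ≠ k) :
    (d.insert k v).items = d.items ++ [(k, v)] := by
  have hc : d.contains k = false := by
    simp [PySem.Dict.contains, List.any_eq_false]
    intro a b hab
    exact h (a, b) hab
  simp [PySem.Dict.insert, hc]

-- one more loop iteration adds the width of s[k]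
theorem pvOffset_succ (s : List (List (String × String))) (k : Nat) :
    pvOffset s (k + 1)
      = pvOffset s k + PySem.Dict.getD pvWIDTH (PySem.Dict.getD ⟨s.getD k []⟩ "type" "single") 0 := by
  unfold pvOffset
  rw [List.range_succ, List.foldl_append]
  simp only [List.foldl_cons, List.foldl_nil, pvOffStep]
  generalize (PySem.Dict.getD (⟨s.getD k []⟩ : PySem.Dict String String) "type" "single") = t
  by_cases h1 : t = "single"
  · subst h1; simp [pvWIDTH, PySem.Dict.getD, PySem.Dict.get?]
  · rw [if_neg h1]
    by_cases h2 : t = "spread" ∨ t = "spread_right" ∨ t = "spread_left"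
    · rw [if_pos h2]
      rcases h2 with h | h | h <;> subst h <;> simp [pvWIDTH, PySem.Dict.getD, PySem.Dict.get?]
    · rw [if_neg h2]; push_neg at h2
      have hfind : List.find? (fun p => p.1 == t)
          [("single", (1 : Int)), ("spread", 2), ("spread_right", 2), ("spread_left", 2)] = none := by
        rw [List.find?_eq_none]
        intro x hx
        simp only [List.mem_cons, List.not_mem_nil, or_false] at hx
        rcases hx with rfl | rfl | rfl | rfl <;> simp only [beq_iff_eq]
        · exact fun h => h1 h.symm
        · exact fun h => h2.1 h.symm
        · exact fun h => h2.2.1 h.symm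
        · exact fun h => h2.2.2 h.symm
      simp [pvWIDTH, PySem.Dict.getD, PySem.Dict.get?, hfind]

theorem pv_keys_insert (d : PySem.Dict Int String) (k : Nat)
    (hd : ∀ p ∈ d.items, p.1 < (k : Int)) (v : String) :
    ∀ q ∈ (d.insert (k : Int) v).items, q.1 < ((k + 1 : Nat) : Int) := by
  rw [pv_insert_fresh _ (fun q hq => ne_of_lt (hd q hq))]
  intro q hq
  rcases List.mem_append.1 hq with h | h
  · have := hd q h; push_cast; omega
  · simp at h; subst h; push_cast; omega

-- A's summary loop from index k, when the summary covers all remaining pages,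
-- equals B's loop over the remaining summary entries with start = offset + 1
theorem pv_summary_loop (s0 : List (String × String)) (srest : List (List (String × String)))
    (ps : List (List (String × String))) :
    ∀ (k : Nat) (d : PySem.Dict Int String),
      k + ps.length ≤ (s0 :: srest).length →
      (∀ p ∈ d.items, p.1 < (k : Int)) →
      ((PySem.List.enumerate ps (k : Int)).foldl (pvAStep (some (s0 :: srest))) d).items
        = d.items ++ pvBLoop (((s0 :: srest).drop k).take ps.length) k (pvOffset (s0 :: srest) k + 1) := by
  intro k d hlen hd
  induction ps generalizing k d with
  | nil => simp [PySem.List.enumerate, pvBLoop]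
  | cons p ps ih =>
    rw [PySem.List.enumerate_cons]
    simp only [List.foldl_cons]
    have hfresh : ∀ q ∈ d.items, q.1 ≠ (k : Int) := fun q hq => ne_of_lt (hd q hq)
    have hcast : ((k : Int) + 1) = ((k + 1 : Nat) : Int) := by push_cast; ring
    have hk : k < (s0 :: srest).length := by simp at hlen ⊢; omega
    have hf : ¬ srest.length < k := by simp at hk; omega
    have hlen' : (k + 1) + ps.length ≤ (s0 :: srest).length := by simp at hlen ⊢; omega
    have hdrop : (s0 :: srest).drop k = ((s0 :: srest)[k]?.getD []) :: (s0 :: srest).drop (k + 1) := by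
      rw [List.getElem?_eq_getElem hk]
      exact List.drop_eq_getElem_cons hk
    have hoff := pvOffset_succ (s0 :: srest) k
    rw [List.getD_eq_getElem?_getD] at hoff
    by_cases ht : PySem.Dict.getD (⟨((s0 :: srest)[k]?.getD [])⟩ : PySem.Dict String String) "type" "single" = "single"
    · have hw : PySem.Dict.getD pvWIDTH
          (PySem.Dict.getD (⟨((s0 :: srest)[k]?.getD [])⟩ : PySem.Dict String String) "type" "single") 0 = 1 := by
        rw [ht]; simp [pvWIDTH, PySem.Dict.getD, PySem.Dict.get?]
      have hoff2 : pvOffset (s0 :: srest) (k + 1) + 1 = pvOffset (s0 :: srest) k + 1 + 1 := by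
        rw [hoff, hw]
      have hstep : pvAStep (some (s0 :: srest)) d ((k : Int), p)
          = d.insert (k : Int) ("PDF第" ++ PySem.Int.toStr (pvOffset (s0 :: srest) k + 1) ++ "页") := by
        simp only [pvAStep, calculate_pdf_page, Int.toNat_natCast, List.getD_eq_getElem?_getD]
        simp [ht, hf, pvOffset]
      rw [hstep, hcast, ih (k + 1) _ hlen' (pv_keys_insert d k hd _), pv_insert_fresh _ hfresh, hoff2]
      rw [hdrop]
      conv_rhs => rw [List.length_cons, List.take_succ_cons, pvBLoop]
      simp only [ht]
      simp [pvWIDTH, PySem.Dict.getD, PySem.Dict.get?]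
    · have hoff2 : pvOffset (s0 :: srest) (k + 1) + 1
          = pvOffset (s0 :: srest) k + 1 + PySem.Dict.getD pvWIDTH
              (PySem.Dict.getD (⟨((s0 :: srest)[k]?.getD [])⟩ : PySem.Dict String String) "type" "single") 0 := by
        rw [hoff]; ring
      have hstep : pvAStep (some (s0 :: srest)) d ((k : Int), p)
          = d.insert (k : Int) ("PDF第" ++ PySem.Int.toStr (pvOffset (s0 :: srest) k + 1) ++ "-"
              ++ PySem.Int.toStr (pvOffset (s0 :: srest) k + 1 + 1) ++ "页（筒子页）") := by
        simp only [pvAStep, calculate_pdf_page, Int.toNat_natCast, List.getD_eq_getElem?_getD]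
        simp [ht, hf, pvOffset]
      rw [hstep, hcast, ih (k + 1) _ hlen' (pv_keys_insert d k hd _), pv_insert_fresh _ hfresh, hoff2]
      rw [hdrop]
      conv_rhs => rw [List.length_cons, List.take_succ_cons, pvBLoop]
      simp [ht]

-- A's fallback loop equals B's fallback comprehension
theorem pv_fallback_loop (summary : Option (List (List (String × String))))
    (hs : summary = none ∨ summary = some []) (ps : List (List (String × String))) :
    ∀ (k : Nat) (d : PySem.Dict Int String),
      (∀ p ∈ d.items, p.1 < (k : Int)) →
      ((PySem.List.enumerate ps (k : Int)).foldl (pvAStep summary) d).items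
        = d.items ++ (PySem.List.enumerate ps (k : Int)).map (fun ip =>
            (ip.1, if PySem.Dict.get? (⟨ip.2⟩ : PySem.Dict String String) "split_info" = none
                   then "PDF第" ++ PySem.Int.toStr (ip.1 + 1) ++ "页"
                   else "PDF第" ++ PySem.Int.toStr (ip.1 + 1) ++ "页（筒子页）")) := by
  intro k d hd
  induction ps generalizing k d with
  | nil => simp [PySem.List.enumerate]
  | cons p ps ih =>
    rw [PySem.List.enumerate_cons]
    have hstep : pvAStep summary d ((k : Int), p) =
        d.insert (k : Int) (if PySem.Dict.get? (⟨p⟩ : PySem.Dict String String) "split_info" = none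
                   then "PDF第" ++ PySem.Int.toStr ((k : Int) + 1) ++ "页"
                   else "PDF第" ++ PySem.Int.toStr ((k : Int) + 1) ++ "页（筒子页）") := by
      rcases hs with h | h <;> subst h <;>
        simp only [pvAStep] <;>
        cases hsi : PySem.Dict.get? (⟨p⟩ : PySem.Dict String String) "split_info" <;> simp
    have hfresh : ∀ q ∈ d.items, q.1 ≠ (k : Int) := fun q hq => ne_of_lt (hd q hq)
    have hcast : ((k : Int) + 1) = ((k + 1 : Nat) : Int) := by push_cast; ring
    simp only [List.foldl_cons, hstep, hcast]
    rw [ih (k + 1) _ (pv_keys_insert d k hd _), pv_insert_fresh _ hfresh]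
    simp only [List.map_cons, List.append_assoc, List.cons_append, List.nil_append, hcast]

-- ===== VERDICT (by name: the statement is the Claim_ definition above) =====
theorem build_page_label_map_from_pages_spec : Claim_equal_build_page_label_map_from_pages := by
  intro pages summary _ hpre
  unfold Spec_build_page_label_map_from_pages
  unfold build_page_label_map_from_pages build_page_label_map_from_pages_alt
  match summary with
  | none =>
    have h := pv_fallback_loop none (Or.inl rfl) pages 0 PySem.Dict.empty (by simp [PySem.Dict.empty])
    simpa [PySem.Dict.empty, pvFallbackLabels] using h
  | some [] =>
    have h := pv_fallback_loop (some []) (Or.inr rfl) pages 0 PySem.Dict.empty (by simp [PySem.Dict.empty])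
    simpa [PySem.Dict.empty, pvFallbackLabels] using h
  | some (s0 :: srest) =>
    have hlen : pages.length ≤ (s0 :: srest).length := by
      unfold Pre_build_page_label_map_from_pages at hpre
      simp at hpre ⊢
      omega
    have h := pv_summary_loop s0 srest pages 0 PySem.Dict.empty (by simpa using hlen)
      (by simp [PySem.Dict.empty])
    simpa [PySem.Dict.empty, pvOffset] using h
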